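-- pv_equiv track=rewrite | github.com/EmreErgeldi/PathFindingAlgorithmsComparison | dfs.py | dfs
-- ===== SOURCE A (Python) =====
-- def dfs(graph, start_node, target_node):
--     visited = set()
--     stack = [(start_node, [start_node])]
--
--     while stack:
--         current_node, path = stack.pop()
--
--         if current_node == target_node:
--             return path
--
--         if current_node not in visited:
--             visited.add(current_node)
--             neighbors = graph[current_node - 1]['neighbors']  # Adjust index for 0-based indexing
--             for neighbor in neighbors:
--                 neighbor_id = neighbor['id']
--                 if neighbor_id not in visited:
--                     stack.append((neighbor_id, path + [neighbor_id]))
--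
--     return None
-- ===== SOURCE B (Python) =====
-- def dfs(graph, start_node, target_node):
--     visited = set()
--
--     def rec(node, path):
--         if node == target_node:
--             return path
--         if node in visited:
--             return None
--         visited.add(node)
--         for neighbor in reversed(graph[node - 1]['neighbors']):
--             neighbor_id = neighbor['id']
--             if neighbor_id not in visited:
--                 result = rec(neighbor_id, path + [neighbor_id])
--                 if result is not None:
--                     return result
--         return None
--
--     return rec(start_node, [start_node])
-- ===== Notes on version B (the rewrite author's own statement) =====
-- stated objective: alternative
-- what changed: A's explicit stack + while loop is replaced by a recursive nested helper rec(node, path) that backtracks over reversed(graph[node-1]['neighbors']), reproducing A's LIFO exploration order without materialising a stack of (node, path) pairs.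
-- outside the precondition, e.g. on dfs([{'neighbors': []}, {}], 1, 2): A returns None, B returns None
import Mathlib
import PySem

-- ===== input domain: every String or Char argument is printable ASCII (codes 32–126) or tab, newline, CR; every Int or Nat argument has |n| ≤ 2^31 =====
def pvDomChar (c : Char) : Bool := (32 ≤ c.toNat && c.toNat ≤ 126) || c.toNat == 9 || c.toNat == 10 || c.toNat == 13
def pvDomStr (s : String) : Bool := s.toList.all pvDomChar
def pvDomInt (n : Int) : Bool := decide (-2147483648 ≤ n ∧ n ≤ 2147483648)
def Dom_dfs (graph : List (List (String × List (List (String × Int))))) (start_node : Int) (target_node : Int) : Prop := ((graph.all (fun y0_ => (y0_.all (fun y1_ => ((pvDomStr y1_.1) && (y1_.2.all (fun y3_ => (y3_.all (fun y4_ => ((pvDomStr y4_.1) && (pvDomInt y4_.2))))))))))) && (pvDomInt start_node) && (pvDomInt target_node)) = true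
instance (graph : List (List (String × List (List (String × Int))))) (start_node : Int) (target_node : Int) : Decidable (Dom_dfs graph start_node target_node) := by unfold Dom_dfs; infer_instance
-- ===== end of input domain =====

-- B changes only the decomposition (recursive backtracking helper instead of A's explicit stack); equivalence is about the return value, neither version mutates its arguments.

-- shared plumbing of both Pythons: graph[node-1]['neighbors'] and the ids of its entries
-- (none = the IndexError/KeyError Python would raise; exact via PySem.List.pyGet? / PySem.Dict.get?)
def nbrIds? (graph : List (List (String × List (List (String × Int))))) (node : Int) : Option (List Int) :=
  match PySem.List.pyGet? graph (node - 1) with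
  | none => none
  | some nd =>
    match (PySem.Dict.mk nd).get? "neighbors" with
    | none => none
    | some ns => ns.mapM (fun nb => (PySem.Dict.mk nb).get? "id")

-- ===== PORT A =====
-- A's while-stack loop; the stack's top is the list head (Python appends/pops at the end,
-- so pushing the neighbors forward is consing them forward). The Nat fuel is only a
-- totality guard: it is consumed exactly when a node is expanded (added to visited).
def dfsLoop (graph : List (List (String × List (List (String × Int))))) (target : Int)
    (f : Nat) (stack : List (Int × List Int)) (v : PySem.Set Int) : Option (List Int) :=
  match stack with
  | [] => none
  | (cur, path) :: rest =>
    if cur = target then some path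
    else if PySem.Set.contains v cur then dfsLoop graph target f rest v
    else
      match f with
      | 0 => none
      | f' + 1 =>
        match nbrIds? graph cur with
        | none => none  -- Python raises here (IndexError/KeyError); excluded by Pre_
        | some ns =>
          dfsLoop graph target f'
            (ns.foldl (fun st n =>
              if PySem.Set.contains (PySem.Set.add v cur) n then st
              else (n, path ++ [n]) :: st) rest)
            (PySem.Set.add v cur)
termination_by (f, stack.length)
decreasing_by
  · exact Prod.Lex.right f (by simp)
  · exact Prod.Lex.left _ _ (by omega)

def dfs (graph : List (List (String × List (List (String × Int))))) (start_node : Int) (target_node : Int) : Option (List Int) :=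
  dfsLoop graph target_node (2 * graph.length + 1) [(start_node, [start_node])] PySem.Set.empty

-- ===== PORT B =====
-- B's recursive helper rec(node, path) with the threaded visited set; dfsGo is the
-- for-loop over reversed(neighbors). Besides the result they return the visited set and
-- the remaining fuel (both implicit state in Python; the fuel again only guards totality
-- and is consumed exactly when a node is expanded).
mutual
def dfsRec (graph : List (List (String × List (List (String × Int))))) (target : Int)
    (f : Nat) (node : Int) (path : List Int) (v : PySem.Set Int) :
    Option (List Int) × PySem.Set Int × Nat :=
  if node = target then (some path, v, f)
  else if PySem.Set.contains v node then (none, v, f)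
  else
    match f with
    | 0 => (none, v, 0)
    | f' + 1 =>
      match nbrIds? graph node with
      | none => (none, PySem.Set.add v node, f')  -- Python raises here; excluded by Pre_
      | some ns => dfsGo graph target f' ns.reverse path (PySem.Set.add v node)
termination_by (f, 0)
decreasing_by exact Prod.Lex.left _ _ (by omega)

def dfsGo (graph : List (List (String × List (List (String × Int))))) (target : Int)
    (f : Nat) (L : List Int) (path : List Int) (v : PySem.Set Int) :
    Option (List Int) × PySem.Set Int × Nat :=
  match L with
  | [] => (none, v, f)
  | n :: r =>
    if PySem.Set.contains v n then dfsGo graph target f r path v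
    else
      match dfsRec graph target f n (path ++ [n]) v with
      | (some p, v', f') => (some p, v', f')
      | (none, v', f') => dfsGo graph target (min f' f) r path v'
termination_by (f, L.length + 1)
decreasing_by
  · exact Prod.Lex.right f (by simp)
  · exact Prod.Lex.right f (by simp)
  · rcases Nat.lt_or_ge (min f' f) f with h | h
    · exact Prod.Lex.left _ _ h
    · have hm : min f' f = f := Nat.le_antisymm (Nat.min_le_right _ _) h
      rw [hm]; exact Prod.Lex.right f (by simp)
end

def dfs_alt (graph : List (List (String × List (List (String × Int))))) (start_node : Int) (target_node : Int) : Option (List Int) :=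
  (dfsRec graph target_node (2 * graph.length + 1) start_node [start_node] PySem.Set.empty).1

-- ===== PRECONDITION & SPEC =====
-- a node entry is usable: it has a 'neighbors' list whose entries all have an 'id' that is
-- a valid (possibly negative, Python-wraparound) 1-based index into graph
def wfNode (len : Int) (nd : List (String × List (List (String × Int)))) : Bool :=
  match (PySem.Dict.mk nd).get? "neighbors" with
  | none => false
  | some ns => ns.all (fun nb =>
      match (PySem.Dict.mk nb).get? "id" with
      | none => false
      | some i => decide (1 - len ≤ i ∧ i ≤ len))

-- Pre_ excludes the inputs where the traversal reaches a node entry without a 'neighbors'/'id'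
-- key or with an id outside Python's (negative-wraparound) index range — A raises KeyError/
-- IndexError there — and, being a static condition on all entries, it also excludes some inputs
-- whose malformed entries happen to be unreachable, on which A (and B) still return None.
def Pre_dfs (graph : List (List (String × List (List (String × Int))))) (start_node : Int) (target_node : Int) : Prop :=
  start_node = target_node ∨
    (1 - (graph.length : Int) ≤ start_node ∧ start_node ≤ (graph.length : Int) ∧
      graph.all (wfNode (graph.length : Int)) = true)
instance (graph : List (List (String × List (List (String × Int))))) (start_node : Int) (target_node : Int) : Decidable (Pre_dfs graph start_node target_node) := by unfold Pre_dfs; infer_instance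

def pvWitness_dfs : (List (List (String × List (List (String × Int))))) × Int × Int :=
  ([[("neighbors", [[("id", 2)]])], [("neighbors", [])]], 1, 2)

def Spec_dfs (graph : List (List (String × List (List (String × Int))))) (start_node : Int) (target_node : Int) (out : Option (List Int)) : Prop := out = dfs_alt graph start_node target_node
instance (graph : List (List (String × List (List (String × Int))))) (start_node : Int) (target_node : Int) (out : Option (List Int)) : Decidable (Spec_dfs graph start_node target_node out) := by unfold Spec_dfs; infer_instance

-- ===== CLAIM (what is proved, stated in full; the proofs are below) =====
def Claim_equal_dfs : Prop := ∀ (graph : List (List (String × List (List (String × Int))))) (start_node : Int) (target_node : Int), Dom_dfs graph start_node target_node → Pre_dfs graph start_node target_node → Spec_dfs graph start_node target_node (dfs graph start_node target_node)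

-- ===== LEMMAS AND PROOFS =====

theorem dfs_witness_ok : Dom_dfs pvWitness_dfs.1 pvWitness_dfs.2.1 pvWitness_dfs.2.2 ∧
    Pre_dfs pvWitness_dfs.1 pvWitness_dfs.2.1 pvWitness_dfs.2.2 := by decide


-- the candidate node ids: everything that indexes into graph without an IndexError
def rngL (len : Nat) : List Int := PySem.List.pyRange (1 - (len : Int)) ((len : Int) + 1) 1

def InR (len : Nat) (x : Int) : Prop := 1 - (len : Int) ≤ x ∧ x ≤ (len : Int)

-- how many candidate ids are not yet visited (the fuel invariant's measure)
def unvis (len : Nat) (v : PySem.Set Int) : Nat :=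
  ((rngL len).filter (fun x => !PySem.Set.contains v x)).length

-- semantic reading of Pre_'s well-formedness: every in-range id has neighbors with in-range ids
def WFg (graph : List (List (String × List (List (String × Int))))) : Prop :=
  ∀ x : Int, InR graph.length x →
    ∃ ns, nbrIds? graph x = some ns ∧ ∀ j ∈ ns, InR graph.length j

theorem mem_rngL {len : Nat} {x : Int} : x ∈ rngL len ↔ InR len x := by
  simp only [rngL, InR, PySem.List.mem_pyRange_one]
  omega

theorem nodup_rngL (len : Nat) : (rngL len).Nodup := PySem.List.nodup_pyRange_one _ _

theorem length_rngL (len : Nat) : (rngL len).length = 2 * len := by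
  simp only [rngL, PySem.List.length_pyRange_one]
  omega

theorem contains_eq_true_iff {v : PySem.Set Int} {x : Int} :
    PySem.Set.contains v x = true ↔ x ∈ v := PySem.Set.contains_iff _ _

theorem contains_add_eq (v : PySem.Set Int) (x y : Int) :
    PySem.Set.contains (PySem.Set.add v x) y = (PySem.Set.contains v y || y == x) := by
  rw [Bool.eq_iff_iff]
  simp only [contains_eq_true_iff, PySem.Set.mem_add, Bool.or_eq_true, beq_iff_eq]

theorem filter_add_len (v : PySem.Set Int) (x : Int) (hnv : x ∉ v) :
    ∀ R : List Int, R.Nodup → x ∈ R →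
      (R.filter (fun y => !PySem.Set.contains (PySem.Set.add v x) y)).length + 1
        = (R.filter (fun y => !PySem.Set.contains v y)).length := by
  intro R
  induction R with
  | nil => intro _ h; cases h
  | cons a R ih =>
    intro hnd hmem
    rcases List.nodup_cons.mp hnd with ⟨hanR, hndR⟩
    by_cases hax : a = x
    · subst hax
      have hpa : (!PySem.Set.contains (PySem.Set.add v a) a) = false := by
        have : PySem.Set.contains (PySem.Set.add v a) a = true := by
          rw [contains_eq_true_iff, PySem.Set.mem_add]; right; rfl
        rw [this]; rfl
      have hqa : (!PySem.Set.contains v a) = true := by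
        have : PySem.Set.contains v a = false := by
          rw [Bool.eq_false_iff, Ne, contains_eq_true_iff]; exact hnv
        rw [this]; rfl
      have hcong : R.filter (fun y => !PySem.Set.contains (PySem.Set.add v a) y)
          = R.filter (fun y => !PySem.Set.contains v y) := by
        apply List.filter_congr
        intro y hy
        have hya : (y == a) = false := by
          rw [beq_eq_false_iff_ne]; intro he; exact hanR (he ▸ hy)
        rw [contains_add_eq, hya, Bool.or_false]
      rw [List.filter_cons, List.filter_cons, hpa, hqa, if_neg (by simp), if_pos rfl, hcong,
        List.length_cons]
    · have hxR : x ∈ R := by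
        rcases List.mem_cons.mp hmem with h | h
        · exact absurd h.symm hax
        · exact h
      have hpq : (!PySem.Set.contains (PySem.Set.add v x) a) = (!PySem.Set.contains v a) := by
        have hax' : (a == x) = false := by rw [beq_eq_false_iff_ne]; exact hax
        rw [contains_add_eq, hax', Bool.or_false]
      rw [List.filter_cons, List.filter_cons, hpq]
      cases hb : (!PySem.Set.contains v a) with
      | true =>
        rw [if_pos rfl, if_pos rfl, List.length_cons, List.length_cons, ← ih hndR hxR]
      | false =>
        rw [if_neg (by simp), if_neg (by simp)]
        exact ih hndR hxR

theorem unvis_add {len : Nat} {v : PySem.Set Int} {x : Int} (hx : InR len x) (hnv : x ∉ v) :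
    unvis len (PySem.Set.add v x) + 1 = unvis len v :=
  filter_add_len v x hnv (rngL len) (nodup_rngL len) (mem_rngL.mpr hx)

theorem unvis_pos {len : Nat} {v : PySem.Set Int} {x : Int} (hx : InR len x) (hnv : x ∉ v) :
    1 ≤ unvis len v := by
  rw [← unvis_add hx hnv]; omega

theorem mapM_ids {len : Nat} :
    ∀ ns : List (List (String × Int)),
      (∀ nb ∈ ns, ∃ i, (PySem.Dict.mk nb).get? "id" = some i ∧ InR len i) →
      ∃ js, ns.mapM (fun nb => (PySem.Dict.mk nb).get? "id") = some js ∧ ∀ j ∈ js, InR len j := by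
  intro ns
  induction ns with
  | nil => intro _; exact ⟨[], by simp, by simp⟩
  | cons nb ns ih =>
    intro h
    obtain ⟨i, hi, hIn⟩ := h nb (List.mem_cons_self)
    obtain ⟨js, hjs, hInj⟩ := ih (fun b hb => h b (List.mem_cons_of_mem _ hb))
    refine ⟨i :: js, ?_, ?_⟩
    · simp [List.mapM_cons, hi, hjs]
    · intro j hj
      rcases List.mem_cons.mp hj with h | h
      · exact h ▸ hIn
      · exact hInj j h

theorem pre_wf (graph : List (List (String × List (List (String × Int)))))
    (hall : graph.all (wfNode (graph.length : Int)) = true) : WFg graph := by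
  intro x hx
  cases hget : PySem.List.pyGet? graph (x - 1) with
  | none =>
    exfalso
    have := (PySem.List.pyGet?_eq_none_iff graph (x-1)).mp hget
    apply this
    simp [PySem.Raise.InRange]
    rcases hx with ⟨h1, h2⟩
    omega
  | some nd =>
    have hnd : nd ∈ graph := PySem.List.mem_of_pyGet?_eq_some graph hget
    have hwf := List.all_eq_true.mp hall nd hnd
    unfold wfNode at hwf
    cases hns : (PySem.Dict.mk nd).get? "neighbors" with
    | none => rw [hns] at hwf; cases hwf
    | some ns =>
      rw [hns] at hwf
      have hids : ∀ nb ∈ ns, ∃ i, (PySem.Dict.mk nb).get? "id" = some i ∧ InR graph.length i := by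
        intro nb hnb
        have := List.all_eq_true.mp hwf nb hnb
        cases hid : (PySem.Dict.mk nb).get? "id" with
        | none => rw [hid] at this; cases this
        | some i =>
          rw [hid] at this
          refine ⟨i, rfl, ?_⟩
          unfold InR
          exact of_decide_eq_true this
      obtain ⟨js, hjs, hInj⟩ := mapM_ids ns hids
      refine ⟨js, ?_, hInj⟩
      unfold nbrIds?
      rw [hget]
      try dsimp only
      rw [hns]
      try dsimp only
      exact hjs

-- invariants of B's recursion: visited only grows, fuel only shrinks, the fuel bound
-- 'unvis ≤ fuel' is preserved, and the target is never added to visited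
theorem post_all (graph : List (List (String × List (List (String × Int)))))
    (hwf : WFg graph) (target : Int) :
    ∀ f : Nat,
      (∀ (node : Int) (path : List Int) (v : PySem.Set Int),
        (InR graph.length node ∨ node = target) →
        (∀ x ∈ v, x ∈ (dfsRec graph target f node path v).2.1) ∧
        (dfsRec graph target f node path v).2.2 ≤ f ∧
        (unvis graph.length v ≤ f →
          unvis graph.length (dfsRec graph target f node path v).2.1 ≤ (dfsRec graph target f node path v).2.2) ∧
        (target ∉ v → target ∉ (dfsRec graph target f node path v).2.1)) ∧
      (∀ (L : List Int) (path : List Int) (v : PySem.Set Int),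
        (∀ n ∈ L, InR graph.length n) →
        (∀ x ∈ v, x ∈ (dfsGo graph target f L path v).2.1) ∧
        (dfsGo graph target f L path v).2.2 ≤ f ∧
        (unvis graph.length v ≤ f →
          unvis graph.length (dfsGo graph target f L path v).2.1 ≤ (dfsGo graph target f L path v).2.2) ∧
        (target ∉ v → target ∉ (dfsGo graph target f L path v).2.1)) := by
  intro f
  induction f using Nat.strong_induction_on with
  | _ f ih =>
  have hR : ∀ (node : Int) (path : List Int) (v : PySem.Set Int),
      (InR graph.length node ∨ node = target) →
      (∀ x ∈ v, x ∈ (dfsRec graph target f node path v).2.1) ∧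
      (dfsRec graph target f node path v).2.2 ≤ f ∧
      (unvis graph.length v ≤ f →
        unvis graph.length (dfsRec graph target f node path v).2.1 ≤ (dfsRec graph target f node path v).2.2) ∧
      (target ∉ v → target ∉ (dfsRec graph target f node path v).2.1) := by
    intro node path v hnode
    rw [dfsRec.eq_def]
    try dsimp only
    by_cases ht : node = target
    · simp only [if_pos ht]
      exact ⟨fun x hx => hx, le_refl _, fun h => h, fun h => h⟩
    · rw [if_neg ht]
      by_cases hm : PySem.Set.contains v node = true
      · simp only [hm, if_pos]
        exact ⟨fun x hx => hx, le_refl _, fun h => h, fun h => h⟩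
      · rw [if_neg hm]
        match f with
        | 0 => exact ⟨fun x hx => hx, le_refl _, fun h => h, fun h => h⟩
        | f' + 1 =>
          try dsimp only
          have hInR : InR graph.length node := by
            rcases hnode with h | h
            · exact h
            · exact absurd h ht
          obtain ⟨ns, hns, hids⟩ := hwf node hInR
          rw [hns]
          try dsimp only
          have hnv : node ∉ v := fun h => hm (contains_eq_true_iff.mpr h)
          obtain ⟨mono, hle, hunv, htgt⟩ :=
            (ih f' (by omega)).2 ns.reverse path (PySem.Set.add v node)
              (fun n hn => hids n (List.mem_reverse.mp hn))
          refine ⟨?_, by omega, ?_, ?_⟩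
          · intro x hx
            exact mono x (by rw [PySem.Set.mem_add]; left; exact hx)
          · intro h
            apply hunv
            have := unvis_add hInR hnv
            omega
          · intro h
            apply htgt
            rw [PySem.Set.mem_add]
            rintro (hc | hc)
            · exact h hc
            · exact ht hc.symm
  refine ⟨hR, ?_⟩
  intro L
  induction L with
  | nil =>
    intro path v _
    rw [dfsGo.eq_def]
    try dsimp only
    exact ⟨fun x hx => hx, le_refl _, fun h => h, fun h => h⟩
  | cons n r ihL =>
    intro path v hL
    rw [dfsGo.eq_def]
    try dsimp only
    by_cases hm : PySem.Set.contains v n = true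
    · simp only [hm, if_pos]
      exact ihL path v (fun a ha => hL a (List.mem_cons_of_mem _ ha))
    · rw [if_neg hm]
      obtain ⟨mono1, hle1, hunv1, htgt1⟩ := hR n (path ++ [n]) v (Or.inl (hL n List.mem_cons_self))
      rcases hRes : dfsRec graph target f n (path ++ [n]) v with ⟨r0, v', f'⟩
      rw [hRes] at mono1 hle1 hunv1 htgt1
      dsimp only at mono1 hle1 hunv1 htgt1
      cases r0 with
      | some p => dsimp only; exact ⟨mono1, hle1, hunv1, htgt1⟩
      | none =>
        dsimp only
        have hmin : min f' f = f' := Nat.min_eq_left hle1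
        rw [hmin]
        have hr : ∀ a ∈ r, InR graph.length a := fun a ha => hL a (List.mem_cons_of_mem _ ha)
        rcases Nat.lt_or_ge f' f with hlt | hge
        · obtain ⟨mono2, hle2, hunv2, htgt2⟩ := (ih f' hlt).2 r path v' hr
          exact ⟨fun x hx => mono2 x (mono1 x hx), by omega,
            fun h => hunv2 (hunv1 h), fun h => htgt2 (htgt1 h)⟩
        · have hf : f' = f := by omega
          subst hf
          obtain ⟨mono2, hle2, hunv2, htgt2⟩ := ihL path v' hr
          exact ⟨fun x hx => mono2 x (mono1 x hx), hle2,
            fun h => hunv2 (hunv1 h), fun h => htgt2 (htgt1 h)⟩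

-- the fold of A's push loop builds the reversed filtered neighbor segment
theorem fold_push_aux (v' : PySem.Set Int) (path : List Int) :
    ∀ (ns : List Int) (st : List (Int × List Int)),
      ns.foldl (fun st n => if PySem.Set.contains v' n then st else (n, path ++ [n]) :: st) st
        = ((ns.filter (fun n => !PySem.Set.contains v' n)).reverse.map
            (fun n => (n, path ++ [n]))) ++ st := by
  intro ns
  induction ns with
  | nil => intro st; simp
  | cons n r ih =>
    intro st
    rw [List.foldl_cons, List.filter_cons]
    cases hc : PySem.Set.contains v' n with
    | true => rw [ih]; simp
    | false => simp only [Bool.not_false, if_pos]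
               rw [if_neg (by simp)]
               rw [ih]; simp

theorem fold_push (v' : PySem.Set Int) (path : List Int) (ns : List Int)
    (st : List (Int × List Int)) :
    ns.foldl (fun st n => if PySem.Set.contains v' n then st else (n, path ++ [n]) :: st) st
      = ((ns.reverse.filter (fun n => !PySem.Set.contains v' n)).map
          (fun n => (n, path ++ [n]))) ++ st := by
  rw [List.filter_reverse, fold_push_aux]

-- the simulation: A's stack loop computes exactly B's recursion; the stack is the
-- concatenation of pending (filtered, reversed) neighbor segments
theorem sim_all (graph : List (List (String × List (List (String × Int)))))
    (hwf : WFg graph) (target : Int) :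
    ∀ f : Nat,
      (∀ (node : Int) (path : List Int) (v : PySem.Set Int) (K : List (Int × List Int)),
        (InR graph.length node ∨ node = target) →
        unvis graph.length v ≤ f → target ∉ v →
        dfsLoop graph target f ((node, path) :: K) v =
          (match dfsRec graph target f node path v with
           | (some p, _, _) => some p
           | (none, v', f') => dfsLoop graph target f' K v')) ∧
      (∀ (L : List Int) (path : List Int) (v w : PySem.Set Int) (K : List (Int × List Int)),
        (∀ n ∈ L, InR graph.length n) →
        (∀ x ∈ w, x ∈ v) →
        unvis graph.length v ≤ f → target ∉ v →
        dfsLoop graph target f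
            (((L.filter (fun n => !PySem.Set.contains w n)).map (fun n => (n, path ++ [n]))) ++ K) v =
          (match dfsGo graph target f L path v with
           | (some p, _, _) => some p
           | (none, v', f') => dfsLoop graph target f' K v')) := by
  intro f
  induction f using Nat.strong_induction_on with
  | _ f ih =>
  have hS1 : ∀ (node : Int) (path : List Int) (v : PySem.Set Int) (K : List (Int × List Int)),
      (InR graph.length node ∨ node = target) →
      unvis graph.length v ≤ f → target ∉ v →
      dfsLoop graph target f ((node, path) :: K) v =
        (match dfsRec graph target f node path v with
         | (some p, _, _) => some p
         | (none, v', f') => dfsLoop graph target f' K v') := by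
    intro node path v K hnode hfuel htv
    rw [dfsLoop.eq_def, dfsRec.eq_def]
    try dsimp only
    by_cases ht : node = target
    · simp only [if_pos ht]
    · rw [if_neg ht, if_neg ht]
      by_cases hm : PySem.Set.contains v node = true
      · simp only [hm, if_pos]
      · rw [if_neg hm, if_neg hm]
        have hInR : InR graph.length node := by
          rcases hnode with h | h
          · exact h
          · exact absurd h ht
        have hnv : node ∉ v := fun h => hm (contains_eq_true_iff.mpr h)
        match f, hfuel with
        | 0, hfuel =>
          exfalso
          have := unvis_pos hInR hnv
          omega
        | f' + 1, hfuel =>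
          dsimp only
          obtain ⟨ns, hns, hids⟩ := hwf node hInR
          rw [hns]
          dsimp only
          rw [fold_push]
          exact (ih f' (by omega)).2 ns.reverse path (PySem.Set.add v node)
            (PySem.Set.add v node) K (fun n hn => hids n (List.mem_reverse.mp hn))
            (fun x hx => hx)
            (by have := unvis_add hInR hnv; omega)
            (by rw [PySem.Set.mem_add]
                rintro (hc | hc)
                · exact htv hc
                · exact ht hc.symm)
  refine ⟨hS1, ?_⟩
  intro L
  induction L with
  | nil =>
    intro path v w K _ _ _ _
    rw [dfsGo.eq_def]
    try dsimp only
    simp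
  | cons n r ihL =>
    intro path v w K hL hwv hfuel htv
    rw [dfsGo.eq_def, List.filter_cons]
    try dsimp only
    by_cases hwn : PySem.Set.contains w n = true
    · have hvn : PySem.Set.contains v n = true :=
        contains_eq_true_iff.mpr (hwv n (contains_eq_true_iff.mp hwn))
      have hcond : ¬((!PySem.Set.contains w n) = true) := by rw [hwn]; decide
      rw [if_neg hcond, if_pos hvn]
      exact ihL path v w K (fun a ha => hL a (List.mem_cons_of_mem _ ha)) hwv hfuel htv
    · rw [Bool.not_eq_true] at hwn
      have hcond : (!PySem.Set.contains w n) = true := by rw [hwn]; decide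
      rw [if_pos hcond, List.map_cons, List.cons_append]
      by_cases hvn : PySem.Set.contains v n = true
      · have hnt : n ≠ target := fun h => htv (h ▸ contains_eq_true_iff.mp hvn)
        rw [dfsLoop.eq_def]
        dsimp only
        rw [if_neg hnt, if_pos hvn]
        simp only [hvn, if_pos]
        exact ihL path v w K (fun a ha => hL a (List.mem_cons_of_mem _ ha)) hwv hfuel htv
      · rw [if_neg hvn]
        have hstep := hS1 n (path ++ [n]) v
          ((r.filter (fun n => !PySem.Set.contains w n)).map (fun n => (n, path ++ [n])) ++ K)
          (Or.inl (hL n List.mem_cons_self)) hfuel htv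
        rw [hstep]
        obtain ⟨mono1, hle1, hunv1, htgt1⟩ :=
          (post_all graph hwf target f).1 n (path ++ [n]) v (Or.inl (hL n List.mem_cons_self))
        rcases hRes : dfsRec graph target f n (path ++ [n]) v with ⟨r0, v', f'⟩
        rw [hRes] at mono1 hle1 hunv1 htgt1
        dsimp only at mono1 hle1 hunv1 htgt1
        cases r0 with
        | some p => rfl
        | none =>
          dsimp only
          have hmin : min f' f = f' := Nat.min_eq_left hle1
          rw [hmin]
          have hr : ∀ a ∈ r, InR graph.length a := fun a ha => hL a (List.mem_cons_of_mem _ ha)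
          have hwv' : ∀ x ∈ w, x ∈ v' := fun x hx => mono1 x (hwv x hx)
          rcases Nat.lt_or_ge f' f with hlt | hge
          · exact (ih f' hlt).2 r path v' w K hr hwv' (hunv1 hfuel) (htgt1 htv)
          · have hf : f' = f := by omega
            subst hf
            exact ihL path v' w K hr hwv' (hunv1 hfuel) (htgt1 htv)

theorem unvis_empty (len : Nat) : unvis len PySem.Set.empty = 2 * len := by
  unfold unvis
  rw [List.filter_eq_self.mpr]
  · exact length_rngL len
  · intro a _
    simp [PySem.Set.empty, PySem.Set.contains]

-- ===== VERDICT (by name: the statement is the Claim_ definition above) =====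
theorem dfs_spec : Claim_equal_dfs := by
  intro graph start target hdom hpre
  unfold Spec_dfs dfs dfs_alt
  rcases hpre with h | ⟨h1, h2, hall⟩
  · subst h
    rw [dfsLoop.eq_def, dfsRec.eq_def]
    try dsimp only
    simp
  · have hwf := pre_wf graph hall
    have hsim := (sim_all graph hwf target (2 * graph.length + 1)).1 start [start]
      PySem.Set.empty [] (Or.inl ⟨h1, h2⟩)
      (by rw [unvis_empty]; omega)
      (by simp [PySem.Set.empty])
    rw [hsim]
    rcases hRes : dfsRec graph target (2 * graph.length + 1) start [start] PySem.Set.empty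
      with ⟨r0, v', f'⟩
    cases r0 with
    | some p => rfl
    | none =>
      dsimp only
      rw [dfsLoop.eq_def]
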